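-- pv_equiv track=rewrite | github.com/LeonardoSeishi/Grafos | A3/coloracao.py | montaBit
-- ===== SOURCE A (Python) =====
-- def montaBit(conjunto, vertices):
--     dicAux = dict()
--     for i in vertices:
--         if i in conjunto:
--             dicAux[i] = '1'
--         else:
--             dicAux[i] = '0'
--     return dicAux
-- ===== SOURCE B (Python) =====
-- def montaBit(conjunto, vertices):
--     dicAux = {v: '0' for v in vertices}
--     vset = set(vertices)
--     for c in conjunto:
--         if c in vset:
--             dicAux[c] = '1'
--     return dicAux
-- ===== Notes on version B (the rewrite author's own statement) =====
-- stated objective: faster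
-- what changed: Instead of testing 'i in conjunto' (a linear scan) for every vertex, B first assigns '0' to every vertex in one pass, then makes a second pass over conjunto marking '1' the elements present in a precomputed set of vertices.
import Mathlib
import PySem

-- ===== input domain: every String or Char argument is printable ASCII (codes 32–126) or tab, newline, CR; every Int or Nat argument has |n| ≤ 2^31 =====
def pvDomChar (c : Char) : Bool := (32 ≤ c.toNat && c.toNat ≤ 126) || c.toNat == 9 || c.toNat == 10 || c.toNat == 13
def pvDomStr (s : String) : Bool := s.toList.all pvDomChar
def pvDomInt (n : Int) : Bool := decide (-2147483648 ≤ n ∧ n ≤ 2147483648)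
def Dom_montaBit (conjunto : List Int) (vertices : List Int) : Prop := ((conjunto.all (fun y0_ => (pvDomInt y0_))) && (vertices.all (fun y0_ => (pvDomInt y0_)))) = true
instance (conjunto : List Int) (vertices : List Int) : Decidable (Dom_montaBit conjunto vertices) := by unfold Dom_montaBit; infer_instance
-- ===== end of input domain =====

-- B replaces A's per-vertex linear membership scan of `conjunto` with two passes:
-- mark every vertex '0', then mark '1' the elements of `conjunto` that are in a set of vertices.

-- ===== PORT A =====
def montaBit (conjunto : List Int) (vertices : List Int) : List (Int × String) :=
  (vertices.foldl
    (fun dicAux i =>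
      if conjunto.contains i then dicAux.insert i "1" else dicAux.insert i "0")
    PySem.Dict.empty).items

-- ===== PORT B =====
def montaBit_alt (conjunto : List Int) (vertices : List Int) : List (Int × String) :=
  (conjunto.foldl
    (fun d c => if (PySem.Set.ofList vertices).contains c then d.insert c "1" else d)
    (vertices.foldl (fun d v => d.insert v "0") PySem.Dict.empty)).items

-- ===== PRECONDITION & SPEC =====
def Spec_montaBit (conjunto : List Int) (vertices : List Int) (out : List (Int × String)) : Prop := out = montaBit_alt conjunto vertices
instance (conjunto : List Int) (vertices : List Int) (out : List (Int × String)) : Decidable (Spec_montaBit conjunto vertices out) := by unfold Spec_montaBit; infer_instance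

-- ===== CLAIM (what is proved, stated in full; the proofs are below) =====
def Claim_equal_montaBit : Prop := ∀ (conjunto : List Int) (vertices : List Int), Dom_montaBit conjunto vertices → Spec_montaBit conjunto vertices (montaBit conjunto vertices)

-- ===== LEMMAS AND PROOFS =====

-- A fold inserting value (g i) for key i, starting from a dict whose items are s.map (i, g i)
-- with s nodup, ends with items (PySem.Set.update s l).map (i, g i).
def fun_zero : Int → String := fun _ => "0"

theorem foldl_insert_keyfun (g : Int → String) (l : List Int) :
    ∀ (s : List Int), s.Nodup →
      (l.foldl (fun d i => d.insert i (g i)) (PySem.Dict.mk (s.map (fun i => (i, g i))))).items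
        = (PySem.Set.update s l).map (fun i => (i, g i)) := by
  induction l with
  | nil => intro s _; simp [PySem.Set.update]
  | cons x xs ih =>
    intro s hs
    by_cases hx : x ∈ s
    · have hc : (PySem.Dict.mk (s.map (fun i => (i, g i)))).contains x = true := by
        simp only [PySem.Dict.contains_mk, List.any_eq_true]
        exact ⟨(x, g x), List.mem_map_of_mem hx, by simp⟩
      have hitems : ((PySem.Dict.mk (s.map (fun i => (i, g i)))).insert x (g x)).items
          = s.map (fun i => (i, g i)) := by
        rw [PySem.Dict.items_insert_of_contains _ _ hc]
        rw [List.map_map]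
        apply List.map_congr_left
        intro a _
        by_cases hax : a = x <;> simp [hax]
      have hdict : (PySem.Dict.mk (s.map (fun i => (i, g i)))).insert x (g x)
          = PySem.Dict.mk (s.map (fun i => (i, g i))) := PySem.Dict.ext hitems
      simp only [List.foldl_cons, hdict, ih s hs]
      simp [PySem.Set.update, PySem.Set.add, hx]
    · have hc : (PySem.Dict.mk (s.map (fun i => (i, g i)))).contains x = false := by
        simp [PySem.Dict.contains_mk, List.any_eq_false]
        intro a ha h
        exact hx (h ▸ ha)
      have hitems : ((PySem.Dict.mk (s.map (fun i => (i, g i)))).insert x (g x)).items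
          = (s ++ [x]).map (fun i => (i, g i)) := by
        rw [PySem.Dict.items_insert_of_not_contains _ _ hc]; simp
      have hdict : (PySem.Dict.mk (s.map (fun i => (i, g i)))).insert x (g x)
          = PySem.Dict.mk ((s ++ [x]).map (fun i => (i, g i))) := PySem.Dict.ext hitems
      simp only [List.foldl_cons, hdict]
      rw [ih (s ++ [x]) (by
        simp [List.nodup_append, hs]
        intro a ha h
        exact hx (h ▸ ha))]
      simp [PySem.Set.update, PySem.Set.add, hx]

-- The marking pass over `conjunto`: a dict over nodup keys s, with values f i, becomes the dict
-- with values '1' on keys met in l (the guard tests membership in a list vs with the same members as s).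
theorem foldl_mark_one (vs : List Int) (l : List Int) :
    ∀ (s : List Int) (f : Int → String), s.Nodup → (∀ x, x ∈ s ↔ x ∈ vs) →
      (l.foldl (fun d c => if vs.contains c then d.insert c "1" else d)
          (PySem.Dict.mk (s.map (fun i => (i, f i))))).items
        = s.map (fun i => (i, if i ∈ l then "1" else f i)) := by
  induction l with
  | nil => intro s f _ _; simp
  | cons x xs ih =>
    intro s f hs hmem
    by_cases hx : x ∈ s
    · have hguard : vs.contains x = true := by
        simp only [List.contains_iff_mem]; exact (hmem x).mp hx
      have hc : (PySem.Dict.mk (s.map (fun i => (i, f i)))).contains x = true := by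
        simp only [PySem.Dict.contains_mk, List.any_eq_true]
        exact ⟨(x, f x), List.mem_map_of_mem hx, by simp⟩
      have hitems : ((PySem.Dict.mk (s.map (fun i => (i, f i)))).insert x "1").items
          = s.map (fun i => (i, if i = x then "1" else f i)) := by
        rw [PySem.Dict.items_insert_of_contains _ _ hc]
        rw [List.map_map]
        apply List.map_congr_left
        intro a _
        by_cases hax : a = x <;> simp [hax]
      have hdict : (PySem.Dict.mk (s.map (fun i => (i, f i)))).insert x "1"
          = PySem.Dict.mk (s.map (fun i => (i, if i = x then "1" else f i))) :=
        PySem.Dict.ext hitems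
      simp only [List.foldl_cons, hguard, if_true, hdict]
      rw [ih s (fun i => if i = x then "1" else f i) hs hmem]
      apply List.map_congr_left
      intro a _
      by_cases hax : a = x <;> by_cases hal : a ∈ xs <;> simp [hax, hal]
    · by_cases hguard : vs.contains x = true
      · exact absurd ((hmem x).mpr (by simpa [List.contains_iff_mem] using hguard)) hx
      · have hg' : vs.contains x = false := by simpa using hguard
        simp only [List.foldl_cons, hg', Bool.false_eq_true, if_false]
        rw [ih s f hs hmem]
        apply List.map_congr_left
        intro a ha
        have hax : a ≠ x := fun h => hx (h ▸ ha)
        simp [hax]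
      
-- ===== VERDICT (by name: the statement is the Claim_ definition above) =====
theorem montaBit_spec : Claim_equal_montaBit := by
  intro conjunto vertices _
  show montaBit conjunto vertices = montaBit_alt conjunto vertices
  unfold montaBit montaBit_alt
  have hA := foldl_insert_keyfun
      (fun i => if conjunto.contains i then "1" else "0") vertices [] List.nodup_nil
  have hB0 := foldl_insert_keyfun (fun _ => "0") vertices [] List.nodup_nil
  have hupd : PySem.Set.update ([] : List Int) vertices = PySem.Set.ofList vertices := by
    simp [PySem.Set.update_nil_left]
  rw [hupd] at hA hB0
  simp only [List.map_nil] at hA hB0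
  -- A's branch equals inserting the key-determined value
  have hAfold : (vertices.foldl
      (fun dicAux i => if conjunto.contains i then dicAux.insert i "1" else dicAux.insert i "0")
      (PySem.Dict.empty : PySem.Dict Int String))
      = (vertices.foldl
      (fun dicAux i => dicAux.insert i (if conjunto.contains i then "1" else "0"))
      PySem.Dict.empty) := by
    apply List.foldl_ext
    intro d i _
    by_cases h : i ∈ conjunto <;> simp [h]
  have he : (PySem.Dict.empty : PySem.Dict Int String) = PySem.Dict.mk [] := rfl
  rw [hAfold, he]
  rw [hA]
  have hBdict : vertices.foldl (fun d v => d.insert v "0") (PySem.Dict.mk [])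
      = PySem.Dict.mk ((PySem.Set.ofList vertices).map (fun i => (i, fun_zero i))) := by
    apply PySem.Dict.ext
    simpa [fun_zero] using hB0
  rw [hBdict]
  simp only [show ∀ (s : PySem.Set Int) (c : Int),
      PySem.Set.contains s c = List.contains s c from fun _ _ => rfl]
  rw [foldl_mark_one (PySem.Set.ofList vertices) conjunto (PySem.Set.ofList vertices)
      fun_zero (PySem.Set.nodup_ofList vertices) (fun _ => Iff.rfl)]
  apply List.map_congr_left
  intro a _
  by_cases h : a ∈ conjunto <;> simp [h, fun_zero]
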